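-- pv_equiv track=rewrite | github.com/rbuurma/rise-2017 | Assignment8Code/bin/textinfo_jw.py | line_cleaner
-- ===== SOURCE A (Python) =====
-- def line_cleaner(text):
--     """
--     Cleans text and returns a list of the cleaned text
--     """
--     text = text.lower()                 # Converts line to lowercase version
--     text_ch_count = len(text)
--     cleaned_s = ""                      # String version of cleaned text
--     for n in range(text_ch_count):
--         ch = text[n]
--         if ch.isalpha() or ch.isdigit():
--             cleaned_s += ch
--         else:                       # Replaces non-alphanumeric characters with
--             cleaned_s += " "        #   spaces
--     clean_line = cleaned_s.split()
--
--     return clean_line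
-- ===== SOURCE B (Python) =====
-- def line_cleaner(text):
--     """
--     Cleans text and returns a list of the cleaned text
--     """
--     result = []
--     buf = []
--     for ch in text.lower():
--         if ch.isalpha() or ch.isdigit():
--             buf.append(ch)
--         else:
--             if buf:
--                 result.append(''.join(buf))
--                 buf = []
--     if buf:
--         result.append(''.join(buf))
--     return result
-- ===== Notes on version B (the rewrite author's own statement) =====
-- stated objective: faster
-- what changed: Single pass over text.lower() maintaining a current-token buffer flushed at each non-alphanumeric character, instead of building an intermediate space-masked string and then calling str.split().
import Mathlib
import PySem

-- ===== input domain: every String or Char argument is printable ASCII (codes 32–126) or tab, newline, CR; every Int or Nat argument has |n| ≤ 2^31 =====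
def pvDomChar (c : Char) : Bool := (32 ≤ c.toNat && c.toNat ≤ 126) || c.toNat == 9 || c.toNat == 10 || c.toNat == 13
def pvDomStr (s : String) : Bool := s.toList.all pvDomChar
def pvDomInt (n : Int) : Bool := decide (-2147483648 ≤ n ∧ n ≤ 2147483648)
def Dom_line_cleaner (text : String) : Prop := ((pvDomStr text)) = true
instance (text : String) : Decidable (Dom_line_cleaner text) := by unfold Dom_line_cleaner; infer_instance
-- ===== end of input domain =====

-- B replaces A's space-masked intermediate string + str.split() by a single pass with a
-- current-token buffer (objective: faster by a constant factor — no intermediate string).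


-- ===== PORT A =====
def line_cleaner (text : String) : List String :=
  let t := PySem.Str.lower text                  -- text = text.lower()
  let n := PySem.Str.len t                       -- text_ch_count = len(text)
  -- cleaned_s, built character by character (strings carried as List Char)
  let cleaned : List Char := (PySem.List.pyRange 0 n 1).foldl
    (fun acc j =>
      let ch := PySem.List.pyGetD t.toList j ' '  -- ch = text[n] (index always in range)
      if PySem.Chars.isalpha ch || PySem.Chars.isdigit ch then acc ++ [ch]
      else acc ++ [' '])
    []
  PySem.Str.split₀ (String.ofList cleaned)       -- cleaned_s.split()

-- ===== PORT B =====
def line_cleaner_alt (text : String) : List String :=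
  let step := fun (st : List String × List Char) (ch : Char) =>
    if PySem.Chars.isalpha ch || PySem.Chars.isdigit ch then (st.1, st.2 ++ [ch])
    else if st.2.isEmpty then st
    else (st.1 ++ [String.ofList st.2], ([] : List Char))
  let st := (PySem.Str.lower text).toList.foldl step ([], [])
  if st.2.isEmpty then st.1 else st.1 ++ [String.ofList st.2]

-- ===== PRECONDITION & SPEC =====
def Spec_line_cleaner (text : String) (out : List String) : Prop := out = line_cleaner_alt text
instance (text : String) (out : List String) : Decidable (Spec_line_cleaner text out) := by unfold Spec_line_cleaner; infer_instance

-- ===== CLAIM (what is proved, stated in full; the proofs are below) =====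
def Claim_equal_line_cleaner : Prop := ∀ (text : String), Dom_line_cleaner text → Spec_line_cleaner text (line_cleaner text)

-- ===== LEMMAS AND PROOFS =====

-- alphanumeric predicate shared by both programs
def pvPred (c : Char) : Bool := PySem.Chars.isalpha c || PySem.Chars.isdigit c

-- A's masking of one character
def pvMask (c : Char) : Char := if pvPred c then c else ' '

-- reference tokenizer both ports are reduced to
def pvWords : List Char → List Char → List (List Char)
  | [], buf => if buf.isEmpty then [] else [buf]
  | c :: cs, buf =>
      if pvPred c then pvWords cs (buf ++ [c])
      else if buf.isEmpty then pvWords cs []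
      else buf :: pvWords cs []

theorem pvPred_not_space (c : Char) (h : pvPred c = true) : PySem.Chars.isspace c = false := by
  simp [pvPred, PySem.Chars.isalpha, PySem.Chars.isupper, PySem.Chars.islower,
    PySem.Chars.isdigit, Char.le_def, UInt32.le_iff_toNat_le, Char.toNat_val] at h
  simp only [PySem.Chars.isspace,
    Bool.or_eq_false_iff, Bool.and_eq_false_iff, decide_eq_false_iff_not, not_le]
  omega

theorem pvMask_go (cs : List Char) : ∀ (cur : List Char) (acc : List (List Char)),
    (∀ c ∈ cur, pvPred c = true) →
    PySem.Chars.split₀.go (cs.map pvMask) cur acc = acc.reverse ++ pvWords cs cur.reverse := by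
  induction cs with
  | nil =>
      intro cur acc _
      simp [PySem.Chars.split₀.go, pvWords]
      by_cases h : cur = [] <;> simp [h]
  | cons c cs ih =>
      intro cur acc hcur
      by_cases hp : pvPred c = true
      · have hm : pvMask c = c := by simp [pvMask, hp]
        simp only [List.map_cons, hm, PySem.Chars.split₀.go, pvPred_not_space c hp]
        rw [ih (c :: cur) acc (by
          intro x hx
          cases hx with
          | head => exact hp
          | tail _ hx => exact hcur _ hx)]
        simp [pvWords, hp]
      · have hp' : pvPred c = false := by simpa using hp
        have hm : pvMask c = ' ' := by simp [pvMask, hp']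
        have hsp : PySem.Chars.isspace ' ' = true := by decide
        simp only [List.map_cons, hm, PySem.Chars.split₀.go, hsp, if_pos]
        by_cases hc : cur = []
        · subst hc
          simp only [List.isEmpty_nil, if_pos]
          rw [ih [] acc (by simp)]
          simp [pvWords, hp']
        · have hce : cur.isEmpty = false := by simp [hc]
          simp only [hce, Bool.false_eq_true, if_false]
          rw [ih [] (cur.reverse :: acc) (by simp)]
          simp [pvWords, hp, hc]

theorem pvFoldl_words (cs : List Char) : ∀ (res : List String) (buf : List Char),
    (let st := cs.foldl
        (fun (st : List String × List Char) (ch : Char) =>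
          if PySem.Chars.isalpha ch || PySem.Chars.isdigit ch then (st.1, st.2 ++ [ch])
          else if st.2.isEmpty then st
          else (st.1 ++ [String.ofList st.2], ([] : List Char)))
        (res, buf)
      if st.2.isEmpty then st.1 else st.1 ++ [String.ofList st.2])
      = res ++ (pvWords cs buf).map String.ofList := by
  induction cs with
  | nil =>
      intro res buf
      by_cases h : buf = [] <;> simp [pvWords, h]
  | cons c cs ih =>
      intro res buf
      by_cases hp : pvPred c = true
      · have : (PySem.Chars.isalpha c || PySem.Chars.isdigit c) = true := hp
        simp only [List.foldl_cons, this, if_pos]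
        rw [ih res (buf ++ [c])]
        simp [pvWords, hp]
      · have hp' : (PySem.Chars.isalpha c || PySem.Chars.isdigit c) = false := by
          simpa [pvPred] using hp
        by_cases hb : buf = []
        · subst hb
          simp only [List.foldl_cons, hp', Bool.false_eq_true, if_false, List.isEmpty_nil, if_pos]
          rw [ih res []]
          simp [pvWords, hp]
        · have hbe : buf.isEmpty = false := by simp [hb]
          simp only [List.foldl_cons, hp', Bool.false_eq_true, if_false, hbe]
          rw [ih (res ++ [String.ofList buf]) []]
          simp [pvWords, hp, hb]

-- ===== VERDICT (by name: the statement is the Claim_ definition above) =====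
theorem line_cleaner_spec : Claim_equal_line_cleaner := by
  intro text _
  unfold Spec_line_cleaner line_cleaner line_cleaner_alt
  simp only [PySem.Str.len_eq]
  rw [PySem.List.foldl_pyRange_zero_pyGetD' (PySem.Str.lower text).toList ' '
    (fun acc ch => if PySem.Chars.isalpha ch || PySem.Chars.isdigit ch then acc ++ [ch]
      else acc ++ [' ']) []]
  have hmask : ∀ (l : List Char) (acc : List Char),
      l.foldl (fun acc ch => if PySem.Chars.isalpha ch || PySem.Chars.isdigit ch then acc ++ [ch]
        else acc ++ [' ']) acc = acc ++ l.map pvMask := by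
    intro l acc
    have := PySem.List.foldl_append_singleton_eq_map pvMask l acc
    rw [← this]
    congr 1
    funext a x
    by_cases h : (PySem.Chars.isalpha x || PySem.Chars.isdigit x) = true <;>
      simp [pvMask, pvPred, h]
  rw [hmask]
  simp only [List.nil_append, PySem.Str.split₀]
  have hto : (String.ofList ((PySem.Str.lower text).toList.map pvMask)).toList
      = (PySem.Str.lower text).toList.map pvMask := by simp
  rw [hto]
  have := pvMask_go (PySem.Str.lower text).toList [] [] (by simp)
  simp only [List.reverse_nil, List.nil_append] at this
  rw [PySem.Chars.split₀, this]
  exact (pvFoldl_words (PySem.Str.lower text).toList [] []).symm
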